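-- pv_equiv track=rewrite | github.com/wangzizhe/GateForge | gateforge/agent_modelica_medium_hard_training_trace_v0_80_0.py | _learning_roles
-- ===== SOURCE A (Python) =====
-- from typing import Any
--
-- def _learning_roles(arm_outcomes: dict[str, dict[str, Any]]) -> list[str]:
--     roles: set[str] = set()
--     any_pass = any(outcome["taxonomy"] in {"solved_submitted", "solved_without_submission"} for outcome in arm_outcomes.values())
--     any_fail_with_successful_candidate = any(
--         outcome["taxonomy"] == "successful_candidate_not_submitted" for outcome in arm_outcomes.values()
--     )
--     all_clean_fail = all(
--         outcome["taxonomy"] in {"successful_candidate_not_submitted", "candidate_generation_failure"}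
--         for outcome in arm_outcomes.values()
--     )
--     if any_pass:
--         roles.add("positive_solution_available")
--     if any_fail_with_successful_candidate:
--         roles.add("submit_decision_supervision_candidate")
--     if all_clean_fail and any_fail_with_successful_candidate:
--         roles.add("persistent_failure_with_unsubmitted_success_candidate")
--     if all_clean_fail and not any_fail_with_successful_candidate:
--         roles.add("candidate_generation_negative_only")
--     if any_pass and any(
--         outcome["taxonomy"] in {"successful_candidate_not_submitted", "candidate_generation_failure"}
--         for outcome in arm_outcomes.values()
--     ):
--         roles.add("budget_sensitive_positive_transition")
--     return sorted(roles) or ["unclassified"]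
-- ===== SOURCE B (Python) =====
-- def _learning_roles(arm_outcomes: dict[str, dict[str, str]]) -> list[str]:
--     any_pass = any_scns = any_clean = False
--     all_clean = True
--     for outcome in arm_outcomes.values():
--         t = outcome["taxonomy"]
--         if t in ("solved_submitted", "solved_without_submission"):
--             any_pass = True
--         if t == "successful_candidate_not_submitted":
--             any_scns = True
--         if t in ("successful_candidate_not_submitted", "candidate_generation_failure"):
--             any_clean = True
--         else:
--             all_clean = False
--     roles: list[str] = []
--     if any_pass and any_clean:
--         roles.append("budget_sensitive_positive_transition")
--     if all_clean and not any_scns: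
--         roles.append("candidate_generation_negative_only")
--     if all_clean and any_scns:
--         roles.append("persistent_failure_with_unsubmitted_success_candidate")
--     if any_pass:
--         roles.append("positive_solution_available")
--     if any_scns:
--         roles.append("submit_decision_supervision_candidate")
--     return roles or ["unclassified"]
-- ===== Notes on version B (the rewrite author's own statement) =====
-- stated objective: simpler
-- what changed: A's five separate any/all generator passes over the values and its sorted(set(...)) are replaced by one loop that reads each outcome's taxonomy once into four boolean accumulators, after which the role strings are appended directly in alphabetical order, so no set and no sort is needed.
import Mathlib
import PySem

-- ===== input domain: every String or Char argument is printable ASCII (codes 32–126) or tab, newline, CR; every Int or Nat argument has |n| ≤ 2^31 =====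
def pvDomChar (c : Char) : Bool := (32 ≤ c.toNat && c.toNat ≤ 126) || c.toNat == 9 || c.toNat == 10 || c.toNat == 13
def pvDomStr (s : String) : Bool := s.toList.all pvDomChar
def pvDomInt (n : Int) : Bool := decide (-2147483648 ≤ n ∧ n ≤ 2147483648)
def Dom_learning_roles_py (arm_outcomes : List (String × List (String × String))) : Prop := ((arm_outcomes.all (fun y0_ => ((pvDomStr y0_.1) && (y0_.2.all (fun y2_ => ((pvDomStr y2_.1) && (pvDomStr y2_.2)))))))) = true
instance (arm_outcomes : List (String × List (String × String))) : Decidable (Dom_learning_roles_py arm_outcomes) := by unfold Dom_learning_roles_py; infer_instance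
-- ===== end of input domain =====

-- B replaces A's five separate any/all passes and sorted(set) by ONE fold over the values plus
-- emitting the role strings directly in alphabetical order (objective: simpler, single pass, no sort).

-- shared helper: outcome["taxonomy"] (total form; Pre_ guarantees the key is present)
def pvTax (o : List (String × String)) : String :=
  PySem.Dict.getD (PySem.Dict.ofList o) "taxonomy" ""

-- ===== PORT A =====
def learning_roles_py (arm_outcomes : List (String × List (String × String))) : List String :=
  let vals := (PySem.Dict.ofList arm_outcomes).values
  let roles : List String := PySem.Set.empty
  let any_pass := vals.any (fun o => let t := pvTax o; t == "solved_submitted" || t == "solved_without_submission")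
  let any_fail_with_successful_candidate := vals.any (fun o => pvTax o == "successful_candidate_not_submitted")
  let all_clean_fail := vals.all (fun o => let t := pvTax o; t == "successful_candidate_not_submitted" || t == "candidate_generation_failure")
  let roles := if any_pass then PySem.Set.add roles "positive_solution_available" else roles
  let roles := if any_fail_with_successful_candidate then PySem.Set.add roles "submit_decision_supervision_candidate" else roles
  let roles := if all_clean_fail && any_fail_with_successful_candidate then PySem.Set.add roles "persistent_failure_with_unsubmitted_success_candidate" else roles
  let roles := if all_clean_fail && !any_fail_with_successful_candidate then PySem.Set.add roles "candidate_generation_negative_only" else roles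
  let roles := if any_pass && vals.any (fun o => let t := pvTax o; t == "successful_candidate_not_submitted" || t == "candidate_generation_failure") then PySem.Set.add roles "budget_sensitive_positive_transition" else roles
  let s := PySem.List.sorted roles (fun x => x) false
  if s.isEmpty then ["unclassified"] else s

-- ===== PORT B =====
def learning_roles_py_alt (arm_outcomes : List (String × List (String × String))) : List String :=
  let vals := (PySem.Dict.ofList arm_outcomes).values
  let st := vals.foldl (fun st o =>
      let t := pvTax o
      ( st.1 || (t == "solved_submitted" || t == "solved_without_submission"),
        st.2.1 || pvTax o == "successful_candidate_not_submitted",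
        st.2.2.1 || (t == "successful_candidate_not_submitted" || t == "candidate_generation_failure"),
        st.2.2.2 && (t == "successful_candidate_not_submitted" || t == "candidate_generation_failure") ))
    ((false, false, false, true) : Bool × Bool × Bool × Bool)
  let roles : List String := []
  let roles := if st.1 && st.2.2.1 then roles ++ ["budget_sensitive_positive_transition"] else roles
  let roles := if st.2.2.2 && !st.2.1 then roles ++ ["candidate_generation_negative_only"] else roles
  let roles := if st.2.2.2 && st.2.1 then roles ++ ["persistent_failure_with_unsubmitted_success_candidate"] else roles
  let roles := if st.1 then roles ++ ["positive_solution_available"] else roles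
  let roles := if st.2.1 then roles ++ ["submit_decision_supervision_candidate"] else roles
  if roles.isEmpty then ["unclassified"] else roles

-- ===== PRECONDITION & SPEC =====
-- Pre_ excludes inputs where some outcome lacks the "taxonomy" key: there A usually raises KeyError
-- (on a few such inputs A's short-circuiting any/all still returns, but B's single full pass raises).
def Pre_learning_roles_py (arm_outcomes : List (String × List (String × String))) : Prop :=
  ((PySem.Dict.ofList arm_outcomes).values.all (fun o => (PySem.Dict.ofList o).contains "taxonomy")) = true
instance (arm_outcomes : List (String × List (String × String))) : Decidable (Pre_learning_roles_py arm_outcomes) := by unfold Pre_learning_roles_py; infer_instance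

def pvWitness_learning_roles_py : (List (String × List (String × String))) :=
  [("a", [("taxonomy", "solved_submitted")]), ("b", [("taxonomy", "candidate_generation_failure")])]

def Spec_learning_roles_py (arm_outcomes : List (String × List (String × String))) (out : List String) : Prop := out = learning_roles_py_alt arm_outcomes
instance (arm_outcomes : List (String × List (String × String))) (out : List String) : Decidable (Spec_learning_roles_py arm_outcomes out) := by unfold Spec_learning_roles_py; infer_instance

-- ===== CLAIM (what is proved, stated in full; the proofs are below) =====
def Claim_equal_learning_roles_py : Prop := ∀ (arm_outcomes : List (String × List (String × String))), Dom_learning_roles_py arm_outcomes → Pre_learning_roles_py arm_outcomes → Spec_learning_roles_py arm_outcomes (learning_roles_py arm_outcomes)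

-- ===== LEMMAS AND PROOFS =====

-- B's single fold computes exactly A's three any's and the all (with the starting accumulators or'd/and'ed in)
theorem pv_fold_spec (vals : List (List (String × String))) (a b c d : Bool) :
    vals.foldl (fun st o =>
      let t := pvTax o
      ( st.1 || (t == "solved_submitted" || t == "solved_without_submission"),
        st.2.1 || pvTax o == "successful_candidate_not_submitted",
        st.2.2.1 || (t == "successful_candidate_not_submitted" || t == "candidate_generation_failure"),
        st.2.2.2 && (t == "successful_candidate_not_submitted" || t == "candidate_generation_failure") ))
      ((a, b, c, d) : Bool × Bool × Bool × Bool)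
    = ( a || vals.any (fun o => let t := pvTax o; t == "solved_submitted" || t == "solved_without_submission"),
        b || vals.any (fun o => pvTax o == "successful_candidate_not_submitted"),
        c || vals.any (fun o => let t := pvTax o; t == "successful_candidate_not_submitted" || t == "candidate_generation_failure"),
        d && vals.all (fun o => let t := pvTax o; t == "successful_candidate_not_submitted" || t == "candidate_generation_failure") ) := by
  induction vals generalizing a b c d with
  | nil => simp
  | cons o vs ih =>
      simp only [List.foldl_cons, List.any_cons, List.all_cons, ih]
      simp [Bool.or_assoc, Bool.and_assoc]

-- ===== VERDICT (by name: the statement is the Claim_ definition above) =====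
theorem learning_roles_py_spec : Claim_equal_learning_roles_py := by
  intro arm_outcomes _ _
  unfold Spec_learning_roles_py learning_roles_py learning_roles_py_alt
  simp only [pv_fold_spec, Bool.false_or, Bool.true_and]
  generalize (PySem.Dict.ofList arm_outcomes).values.any
      (fun o => let t := pvTax o; t == "solved_submitted" || t == "solved_without_submission") = ap
  generalize (PySem.Dict.ofList arm_outcomes).values.any
      (fun o => pvTax o == "successful_candidate_not_submitted") = af
  generalize (PySem.Dict.ofList arm_outcomes).values.any
      (fun o => let t := pvTax o; t == "successful_candidate_not_submitted" || t == "candidate_generation_failure") = ac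
  generalize (PySem.Dict.ofList arm_outcomes).values.all
      (fun o => let t := pvTax o; t == "successful_candidate_not_submitted" || t == "candidate_generation_failure") = al
  cases ap <;> cases af <;> cases ac <;> cases al <;>
    simp [PySem.List.sorted, PySem.List.insertBy, PySem.Set.add, PySem.Set.empty, PySem.Set.contains] <;> decide
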